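-- pv_equiv track=rewrite | github.com/Adeonthebeat/ThisisCodingTest | algoTest/Section 99/알고리즘 공부.py | solution
-- ===== SOURCE A (Python) =====
-- from collections import deque
-- from collections import deque
--
-- def solution(priorities, location):
--     answer = 0
--     d = deque([(v, i) for i, v in enumerate(priorities)])
--
--     while len(d):
--         item = d.popleft()
--         if d and max(d)[0] > item[0]:
--             d.append(item)
--         else:
--             answer += 1
--             if item[1] == location:
--                 break
--     return answer
-- ===== SOURCE B (Python) =====
-- def solution(priorities, location):
--     answer = 0
--     queue = [(p, i) for i, p in enumerate(priorities)]
--     while queue: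
--         m = max(p for p, _ in queue)
--         kept = []
--         cut = 0
--         for p, i in queue:
--             if p == m:
--                 answer += 1
--                 if i == location:
--                     return answer
--                 cut = len(kept)
--             else:
--                 kept.append((p, i))
--         queue = kept[cut:] + kept[:cut]
--     return answer
-- ===== Notes on version B (the rewrite author's own statement) =====
-- stated objective: faster
-- what changed: replaces the per-item deque rotation with an O(n) inner max scan by whole-pass processing: each pass computes the max once, prints every max-priority document in one sweep and rebuilds the queue as a single rotation of the kept items
import Mathlib
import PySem

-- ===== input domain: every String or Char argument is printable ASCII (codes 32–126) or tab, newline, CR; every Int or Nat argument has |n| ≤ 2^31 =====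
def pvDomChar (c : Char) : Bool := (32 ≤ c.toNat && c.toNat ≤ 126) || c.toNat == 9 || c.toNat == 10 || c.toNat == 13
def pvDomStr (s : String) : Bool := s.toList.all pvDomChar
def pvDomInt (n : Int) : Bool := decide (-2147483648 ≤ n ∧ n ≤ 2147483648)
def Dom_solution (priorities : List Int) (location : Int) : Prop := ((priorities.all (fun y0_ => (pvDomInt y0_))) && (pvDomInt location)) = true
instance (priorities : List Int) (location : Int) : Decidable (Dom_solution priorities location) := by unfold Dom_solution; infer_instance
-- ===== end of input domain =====

-- B replaces A's per-item deque rotation (with an O(n) max scan each step) by whole-pass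
-- processing: one max per pass, all max-priority documents printed in one sweep, the kept
-- items rotated once — measured asymptotically faster.

-- ===== PORT A =====
-- [(v, i) for i, v in enumerate(priorities)] (shared by both ports)
def enumPairs (i : Int) : List Int → List (Int × Int)
  | [] => []
  | v :: vs => (v, i) :: enumPairs (i + 1) vs

-- Python max over (v, i) tuples: lexicographic, first maximal element kept
def pyMax2 : List (Int × Int) → Int × Int
  | [] => (0, 0)
  | x :: r => r.foldl (fun b y => if b.1 < y.1 ∨ (b.1 = y.1 ∧ b.2 < y.2) then y else b) x

-- max of the priorities (first components); also B's `max(p for p, _ in queue)`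
def maxVal : List (Int × Int) → Int
  | [] => 0
  | x :: r => r.foldl (fun a y => max a y.1) x.1

-- index of the first pair carrying the maximal priority (termination measure for A's loop)
def fmIdx (l : List (Int × Int)) : Nat := l.findIdx (fun y => y.1 == maxVal l)

theorem foldl_max_init (r : List (Int × Int)) (i j : Int) :
    r.foldl (fun a y => max a y.1) (max i j) = max i (r.foldl (fun a y => max a y.1) j) := by
  induction r generalizing j with
  | nil => rfl
  | cons y r ih => simpa [max_assoc] using ih (max j y.1)

theorem maxVal_cons (x : Int × Int) (r : List (Int × Int)) (h : r ≠ []) :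
    maxVal (x :: r) = max x.1 (maxVal r) := by
  cases r with
  | nil => exact absurd rfl h
  | cons y r' => simpa [maxVal] using foldl_max_init r' x.1 y.1

theorem maxVal_mem (l : List (Int × Int)) (h : l ≠ []) : ∃ y ∈ l, y.1 = maxVal l := by
  induction l with
  | nil => exact absurd rfl h
  | cons x r ih =>
    cases r with
    | nil => exact ⟨x, by simp [maxVal]⟩
    | cons z r' =>
      rw [maxVal_cons _ _ (by simp)]
      rcases ih (by simp) with ⟨y, hy, hy1⟩
      rcases le_total (maxVal (z :: r')) x.1 with hle | hle
      · exact ⟨x, by simp, (max_eq_left hle).symm⟩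
      · exact ⟨y, by simp [List.mem_cons.1 hy], by rw [max_eq_right hle, hy1]⟩

theorem maxVal_append_singleton (l : List (Int × Int)) (x : Int × Int) (h : l ≠ []) :
    maxVal (l ++ [x]) = max (maxVal l) x.1 := by
  cases l with
  | nil => exact absurd rfl h
  | cons z r => simp [maxVal, List.foldl_append]

theorem pyMax2_fst (l : List (Int × Int)) (h : l ≠ []) : (pyMax2 l).1 = maxVal l := by
  cases l with
  | nil => exact absurd rfl h
  | cons x r =>
    suffices hgen : ∀ (r : List (Int × Int)) (b : Int × Int),
        (r.foldl (fun b y => if b.1 < y.1 ∨ (b.1 = y.1 ∧ b.2 < y.2) then y else b) b).1 =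
          r.foldl (fun a y => max a y.1) b.1 by
      simpa [pyMax2, maxVal] using hgen r x
    intro r
    induction r with
    | nil => intro b; rfl
    | cons y r ih =>
      intro b
      have hstep : (if b.1 < y.1 ∨ (b.1 = y.1 ∧ b.2 < y.2) then y else b).1 = max b.1 y.1 := by
        split_ifs with hc
        · rcases hc with hc | hc
          · omega
          · omega
        · rw [not_or, not_and_or] at hc
          rcases hc with ⟨h1, h2⟩
          rcases h2 with h2 | h2 <;> omega
      simp only [List.foldl_cons, hstep, ih]

theorem fmIdx_lt_length (l : List (Int × Int)) (h : l ≠ []) : fmIdx l < l.length := by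
  rcases maxVal_mem l h with ⟨y, hy, hy1⟩
  exact List.findIdx_lt_length_of_exists ⟨y, hy, by simpa using hy1⟩

theorem fmIdx_cons_of_lt (item : Int × Int) (rest : List (Int × Int)) (h : rest ≠ [])
    (hlt : item.1 < maxVal rest) : fmIdx (item :: rest) = fmIdx rest + 1 := by
  have hmv : maxVal (item :: rest) = maxVal rest := by
    rw [maxVal_cons _ _ h]; omega
  unfold fmIdx
  rw [hmv, List.findIdx_cons]
  have : (item.1 == maxVal rest) = false := by simp; omega
  simp [this]

theorem fmIdx_append_of_lt (item : Int × Int) (rest : List (Int × Int)) (h : rest ≠ [])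
    (hlt : item.1 < maxVal rest) : fmIdx (rest ++ [item]) = fmIdx rest := by
  have hmv : maxVal (rest ++ [item]) = maxVal rest := by
    rw [maxVal_append_singleton _ _ h]; omega
  have hfl := fmIdx_lt_length rest h
  simp only [fmIdx] at hfl ⊢
  rw [hmv, List.findIdx_append, if_pos hfl]

-- A's while loop, transliterated: pop the front; if some remaining priority is larger
-- (Python: `if d and max(d)[0] > item[0]`), rotate it to the back; else print (answer += 1),
-- breaking when its index is `location`.
def solutionLoop (loc : Int) (d : List (Int × Int)) (a : Int) : Int :=
  match d with
  | [] => a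
  | item :: rest =>
    if h : rest ≠ [] ∧ (pyMax2 rest).1 > item.1 then
      solutionLoop loc (rest ++ [item]) a
    else if item.2 = loc then a + 1
    else solutionLoop loc rest (a + 1)
termination_by (d.length, fmIdx d)
decreasing_by
  · have hlt : item.1 < maxVal rest := by rw [← pyMax2_fst rest h.1]; exact h.2
    have h1 := fmIdx_append_of_lt item rest h.1 hlt
    have h2 := fmIdx_cons_of_lt item rest h.1 hlt
    rw [h1, h2]
    have hl : (rest ++ [item]).length = (item :: rest).length := by simp
    rw [hl]
    exact Prod.Lex.right _ (by omega)
  · exact Prod.Lex.left _ _ (by simp)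

def solution (priorities : List Int) (location : Int) : Int :=
  solutionLoop location (enumPairs 0 priorities) 0

-- ===== PORT B =====
-- Source B's inner for-loop over the current queue: prints every item of priority m in order
-- (returning `answer` early — Sum.inl — when location is hit), collecting the others in
-- `kept` and remembering in `cut` the kept-length at the last print.
def innerPass (m loc : Int) : List (Int × Int) → List (Int × Int) → Nat → Int →
    Sum Int (List (Int × Int) × Nat × Int)
  | [], kept, cut, a => Sum.inr (kept, cut, a)
  | x :: r, kept, cut, a =>
    if x.1 = m then
      if x.2 = loc then Sum.inl (a + 1)
      else innerPass m loc r kept kept.length (a + 1)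
    else innerPass m loc r (kept ++ [x]) cut a

-- each pass strictly shrinks the queue as soon as it held an item of priority m
theorem innerPass_inr_len (m loc : Int) :
    ∀ (r kept : List (Int × Int)) (cut : Nat) (a : Int) (k' : List (Int × Int)) (c' : Nat) (a' : Int),
      innerPass m loc r kept cut a = Sum.inr (k', c', a') →
      k'.length ≤ kept.length + r.length ∧
        ((∃ y ∈ r, y.1 = m) → k'.length < kept.length + r.length) := by
  intro r
  induction r with
  | nil =>
    intro kept cut a k' c' a' h
    simp only [innerPass, Sum.inr.injEq, Prod.mk.injEq] at h
    obtain ⟨rfl, rfl, rfl⟩ := h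
    refine ⟨by omega, fun ⟨y, hy, _⟩ => absurd hy (List.not_mem_nil)⟩
  | cons x r ih =>
    intro kept cut a k' c' a' h
    simp only [innerPass] at h
    by_cases hx1 : x.1 = m
    · rw [if_pos hx1] at h
      by_cases hx2 : x.2 = loc
      · rw [if_pos hx2] at h; cases h
      · rw [if_neg hx2] at h
        have h1 := (ih kept kept.length (a + 1) k' c' a' h).1
        constructor
        · simp only [List.length_cons]; omega
        · intro _; simp only [List.length_cons]; omega
    · rw [if_neg hx1] at h
      have := ih (kept ++ [x]) cut a k' c' a' h
      simp only [List.length_append, List.length_cons, List.length_nil] at this ⊢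
      refine ⟨by omega, ?_⟩
      rintro ⟨y, hy, hym⟩
      rcases List.mem_cons.1 hy with rfl | hyr
      · exact absurd hym hx1
      · have := this.2 ⟨y, hyr, hym⟩; omega

-- Source B's while loop: one innerPass per iteration, then queue = kept[cut:] + kept[:cut]
def altLoop (loc : Int) (q : List (Int × Int)) (a : Int) : Int :=
  match q with
  | [] => a
  | x :: r =>
    match hip : innerPass (maxVal (x :: r)) loc (x :: r) [] 0 a with
    | Sum.inl v => v
    | Sum.inr (k', c', a') => altLoop loc (k'.drop c' ++ k'.take c') a'
termination_by q.length
decreasing_by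
  have hlen := innerPass_inr_len (maxVal (x :: r)) loc (x :: r) [] 0 a k' c' a' hip
  have hmem := maxVal_mem (x :: r) (by simp)
  have : k'.length < (x :: r).length := by
    have := hlen.2 hmem
    simpa using this
  simp only [List.length_append, List.length_drop, List.length_take]
  omega

def solution_alt (priorities : List Int) (location : Int) : Int :=
  altLoop location (enumPairs 0 priorities) 0

-- ===== PRECONDITION & SPEC =====
def Spec_solution (priorities : List Int) (location : Int) (out : Int) : Prop := out = solution_alt priorities location
instance (priorities : List Int) (location : Int) (out : Int) : Decidable (Spec_solution priorities location out) := by unfold Spec_solution; infer_instance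

-- ===== CLAIM (what is proved, stated in full; the proofs are below) =====
def Claim_equal_solution : Prop := ∀ (priorities : List Int) (location : Int), Dom_solution priorities location → Spec_solution priorities location (solution priorities location)

-- ===== LEMMAS AND PROOFS =====

-- the common spine: rotate the queue to its first maximal-priority item, print it, repeat
def spineF (loc : Int) : Nat → List (Int × Int) → Int → Int
  | _, [], a => a
  | 0, _ :: _, a => a
  | n + 1, d@(_ :: _), a =>
    match d.drop (fmIdx d) ++ d.take (fmIdx d) with
    | [] => a
    | x :: r => if x.2 = loc then a + 1 else spineF loc n r (a + 1)

def spine (loc : Int) (d : List (Int × Int)) (a : Int) : Int := spineF loc d.length d a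

theorem le_maxVal (l : List (Int × Int)) (y : Int × Int) (hy : y ∈ l) : y.1 ≤ maxVal l := by
  induction l with
  | nil => cases hy
  | cons x r ih =>
    rcases List.mem_cons.1 hy with h | h
    · subst h
      cases r with
      | nil => simp [maxVal]
      | cons z r' => rw [maxVal_cons _ _ (by simp)]; exact le_max_left _ _
    · have hr : r ≠ [] := by rintro rfl; cases h
      rw [maxVal_cons _ _ hr]
      exact le_trans (ih h) (le_max_right _ _)

theorem maxVal_eq (l : List (Int × Int)) (v : Int) (hub : ∀ y ∈ l, y.1 ≤ v)
    (hmem : ∃ y ∈ l, y.1 = v) : maxVal l = v := by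
  rcases hmem with ⟨y, hy, rfl⟩
  have hne : l ≠ [] := by rintro rfl; cases hy
  rcases maxVal_mem l hne with ⟨z, hz, hz1⟩
  exact le_antisymm (hz1 ▸ hub z hz) (le_maxVal l y hy)

theorem spineF_succ (loc : Int) (n : Nat) (d : List (Int × Int)) (a : Int) (hd : d ≠ [])
    (x : Int × Int) (r : List (Int × Int))
    (hrot : d.drop (fmIdx d) ++ d.take (fmIdx d) = x :: r) :
    spineF loc (n + 1) d a = if x.2 = loc then a + 1 else spineF loc n r (a + 1) := by
  cases d with
  | nil => exact absurd rfl hd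
  | cons z t => rw [spineF, hrot]

theorem spineF_congr_rot (loc : Int) (n : Nat) (d d' : List (Int × Int)) (a : Int)
    (hd : d ≠ []) (hd' : d' ≠ [])
    (hrot : d.drop (fmIdx d) ++ d.take (fmIdx d) = d'.drop (fmIdx d') ++ d'.take (fmIdx d')) :
    spineF loc (n + 1) d a = spineF loc (n + 1) d' a := by
  cases d with
  | nil => exact absurd rfl hd
  | cons z t =>
    cases d' with
    | nil => exact absurd rfl hd'
    | cons z' t' => rw [spineF, spineF, hrot]

-- printing step of the spine, in general position: everything before x is strictly smaller,
-- everything after is no larger, so x prints next and the queue rotates past it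
theorem spine_print (loc : Int) (l1 : List (Int × Int)) (x : Int × Int)
    (l2 : List (Int × Int)) (a : Int)
    (h1 : ∀ y ∈ l1, y.1 < x.1) (h2 : ∀ y ∈ l2, y.1 ≤ x.1) :
    spine loc (l1 ++ x :: l2) a = if x.2 = loc then a + 1 else spine loc (l2 ++ l1) (a + 1) := by
  have hmv : maxVal (l1 ++ x :: l2) = x.1 := by
    refine maxVal_eq _ _ ?_ ⟨x, by simp, rfl⟩
    intro y hy
    rcases List.mem_append.1 hy with hy | hy
    · exact le_of_lt (h1 y hy)
    · rcases List.mem_cons.1 hy with rfl | hy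
      · exact le_refl _
      · exact h2 y hy
  have hfm : fmIdx (l1 ++ x :: l2) = l1.length := by
    unfold fmIdx
    rw [hmv, List.findIdx_append]
    have hnol1 : List.findIdx (fun y => y.1 == x.1) l1 = l1.length := by
      rw [List.findIdx_eq_length]
      intro y hy
      simp only [beq_eq_false_iff_ne, ne_eq]
      exact ne_of_lt (h1 y hy)
    rw [hnol1, if_neg (lt_irrefl _), List.findIdx_cons]
    simp
  have hrot : (l1 ++ x :: l2).drop (fmIdx (l1 ++ x :: l2)) ++
      (l1 ++ x :: l2).take (fmIdx (l1 ++ x :: l2)) = x :: (l2 ++ l1) := by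
    rw [hfm, List.drop_left, List.take_left, List.cons_append]
  have hlen : (l1 ++ x :: l2).length = (l2 ++ l1).length + 1 := by
    simp [List.length_append]; omega
  unfold spine
  rw [hlen, spineF_succ loc _ _ a (by simp) x (l2 ++ l1) hrot]

-- rotating a non-maximal front item to the back does not change the spine
theorem spine_rotate (loc : Int) (item : Int × Int) (rest : List (Int × Int)) (a : Int)
    (h : rest ≠ []) (hlt : item.1 < maxVal rest) :
    spine loc (rest ++ [item]) a = spine loc (item :: rest) a := by
  have hk := fmIdx_lt_length rest h
  have h1 := fmIdx_append_of_lt item rest h hlt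
  have h2 := fmIdx_cons_of_lt item rest h hlt
  have hrot : (rest ++ [item]).drop (fmIdx (rest ++ [item])) ++
      (rest ++ [item]).take (fmIdx (rest ++ [item])) =
      (item :: rest).drop (fmIdx (item :: rest)) ++ (item :: rest).take (fmIdx (item :: rest)) := by
    rw [h1, h2]
    rw [List.drop_append_of_le_length (le_of_lt hk), List.take_append_of_le_length (le_of_lt hk)]
    simp [List.drop_succ_cons, List.take_succ_cons]
  have hlen : (rest ++ [item]).length = rest.length + 1 := by simp
  have hlen2 : (item :: rest).length = rest.length + 1 := by simp
  unfold spine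
  rw [hlen, hlen2]
  exact spineF_congr_rot loc _ _ _ a (by simp) (by simp) hrot

theorem solutionLoop_eq_spine (loc : Int) : ∀ (d : List (Int × Int)) (a : Int),
    solutionLoop loc d a = spine loc d a := by
  intro d a
  induction d, a using solutionLoop.induct loc with
  | case1 a => simp [solutionLoop, spine, spineF]
  | case2 a item rest h ih =>
    rw [solutionLoop, dif_pos h, ih]
    exact spine_rotate loc item rest _ h.1 (by rw [← pyMax2_fst rest h.1]; exact h.2)
  | case3 a item rest h hloc =>
    rw [solutionLoop, dif_neg h]
    have hle : ∀ y ∈ rest, y.1 ≤ item.1 := by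
      intro y hy
      have hne : rest ≠ [] := by rintro rfl; cases hy
      have hmx : ¬ (pyMax2 rest).1 > item.1 := fun hgt => h ⟨hne, hgt⟩
      rw [pyMax2_fst rest hne] at hmx
      exact le_trans (le_maxVal rest y hy) (by omega)
    have hsp := spine_print loc [] item rest a (by simp) hle
    simp only [List.nil_append, List.append_nil] at hsp
    rw [hsp, if_pos hloc, if_pos hloc]
  | case4 a item rest h hloc ih =>
    rw [solutionLoop, dif_neg h]
    have hle : ∀ y ∈ rest, y.1 ≤ item.1 := by
      intro y hy
      have hne : rest ≠ [] := by rintro rfl; cases hy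
      have hmx : ¬ (pyMax2 rest).1 > item.1 := fun hgt => h ⟨hne, hgt⟩
      rw [pyMax2_fst rest hne] at hmx
      exact le_trans (le_maxVal rest y hy) (by omega)
    have hsp := spine_print loc [] item rest a (by simp) hle
    simp only [List.nil_append, List.append_nil] at hsp
    rw [hsp, if_neg hloc, if_neg hloc, ih]

theorem innerPass_spec (m loc : Int) : ∀ (r kept : List (Int × Int)) (cut : Nat) (a : Int),
    cut ≤ kept.length → (∀ y ∈ kept, y.1 < m) → (∀ y ∈ r, y.1 ≤ m) →
    (∀ v, innerPass m loc r kept cut a = Sum.inl v →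
        spine loc (kept.drop cut ++ r ++ kept.take cut) a = v) ∧
      (∀ k' c' a', innerPass m loc r kept cut a = Sum.inr (k', c', a') →
        spine loc (kept.drop cut ++ r ++ kept.take cut) a = spine loc (k'.drop c' ++ k'.take c') a') := by
  intro r
  induction r with
  | nil =>
    intro kept cut a _ _ _
    constructor
    · intro v h; simp [innerPass] at h
    · intro k' c' a' h
      simp only [innerPass, Sum.inr.injEq, Prod.mk.injEq] at h
      obtain ⟨rfl, rfl, rfl⟩ := h
      simp
  | cons x r ih =>
    intro kept cut a hcut hkept hr
    have hxle : x.1 ≤ m := hr x (by simp)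
    have hrle : ∀ y ∈ r, y.1 ≤ m := fun y hy => hr y (by simp [hy])
    by_cases hx1 : x.1 = m
    · -- x prints in this pass
      have hQ : kept.drop cut ++ (x :: r) ++ kept.take cut =
          kept.drop cut ++ x :: (r ++ kept.take cut) := by simp
      have hpr := spine_print loc (kept.drop cut) x (r ++ kept.take cut) a
        (fun y hy => hx1 ▸ hkept y (List.mem_of_mem_drop hy))
        (by
          intro y hy
          rcases List.mem_append.1 hy with hy | hy
          · exact hx1 ▸ hrle y hy
          · exact hx1 ▸ le_of_lt (hkept y (List.mem_of_mem_take hy)))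
      by_cases hx2 : x.2 = loc
      · constructor
        · intro v h
          simp only [innerPass, if_pos hx1, if_pos hx2, Sum.inl.injEq] at h
          rw [hQ, hpr, if_pos hx2, h]
        · intro k' c' a' h
          simp [innerPass, hx1, hx2] at h
      · have hrest : (r ++ kept.take cut) ++ kept.drop cut = r ++ kept := by
          rw [List.append_assoc, List.take_append_drop]
        have step : spine loc (kept.drop cut ++ (x :: r) ++ kept.take cut) a =
            spine loc (r ++ kept) (a + 1) := by
          rw [hQ, hpr, if_neg hx2, hrest]
        have ihh := ih kept kept.length (a + 1) (le_refl _) hkept hrle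
        simp only [List.drop_length, List.take_length, List.nil_append] at ihh
        constructor
        · intro v h
          simp only [innerPass, if_pos hx1, if_neg hx2] at h
          rw [step]
          exact ihh.1 v h
        · intro k' c' a' h
          simp only [innerPass, if_pos hx1, if_neg hx2] at h
          rw [step]
          exact ihh.2 k' c' a' h
    · -- x is kept
      have hx1' : x.1 < m := lt_of_le_of_ne hxle hx1
      have hkept' : ∀ y ∈ kept ++ [x], y.1 < m := by
        intro y hy
        rcases List.mem_append.1 hy with hy | hy
        · exact hkept y hy
        · simp at hy; subst hy; exact hx1'
      have ihh := ih (kept ++ [x]) cut a (by simp; omega) hkept' hrle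
      have hQ : (kept ++ [x]).drop cut ++ r ++ (kept ++ [x]).take cut =
          kept.drop cut ++ (x :: r) ++ kept.take cut := by
        rw [List.drop_append_of_le_length hcut, List.take_append_of_le_length hcut]
        simp
      rw [hQ] at ihh
      constructor
      · intro v h
        simp only [innerPass, if_neg hx1] at h
        exact ihh.1 v h
      · intro k' c' a' h
        simp only [innerPass, if_neg hx1] at h
        exact ihh.2 k' c' a' h

theorem altLoop_eq_spine (loc : Int) : ∀ (q : List (Int × Int)) (a : Int),
    altLoop loc q a = spine loc q a := by
  intro q a
  induction q, a using altLoop.induct loc with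
  | case1 a => simp [altLoop, spine, spineF]
  | case2 a x r v h =>
    rw [altLoop, h]
    have hspec := innerPass_spec (maxVal (x :: r)) loc (x :: r) [] 0 a (by simp) (by simp)
      (fun y hy => le_maxVal (x :: r) y hy)
    have hv := hspec.1 v h
    simpa using hv.symm
  | case3 a x r k' c' a' h ih =>
    rw [altLoop, h]
    have hspec := innerPass_spec (maxVal (x :: r)) loc (x :: r) [] 0 a (by simp) (by simp)
      (fun y hy => le_maxVal (x :: r) y hy)
    have hv := hspec.2 k' c' a' h
    simp only [List.drop_nil, List.take_nil, List.nil_append, List.append_nil] at hv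
    dsimp only
    rw [ih, ← hv]

-- ===== VERDICT (by name: the statement is the Claim_ definition above) =====
theorem solution_spec : Claim_equal_solution := by
  intro priorities location _
  unfold Spec_solution solution solution_alt
  rw [solutionLoop_eq_spine, altLoop_eq_spine]
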